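-- pv_equiv track=rewrite | github.com/AIdevsmartdata/chimere | chimere-dflash/scripts/eval_expert_prefetch.py | _proxy_feature_layer
-- ===== SOURCE A (Python) =====
-- FEATURE_LAYERS = [1, 10, 19, 28, 37]
--
-- def _proxy_feature_layer(moe_layer: int) -> int:
--     """Return the nearest feature layer index (into FEATURE_LAYERS) for a given MoE layer."""
--     # Find the feature layer with the smallest absolute distance
--     best_idx = 0
--     best_dist = abs(moe_layer - FEATURE_LAYERS[0])
--     for i, fl in enumerate(FEATURE_LAYERS):
--         d = abs(moe_layer - fl)
--         if d < best_dist: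
--             best_dist = d
--             best_idx = i
--     return best_idx
-- ===== SOURCE B (Python) =====
-- # B: bucket moe_layer by the midpoints between consecutive feature layers
-- # (5.5, 14.5, 23.5, 32.5; for integer input "> 5.5" == "> 5", etc.):
-- # the answer is how many midpoints moe_layer strictly exceeds.
-- MIDPOINTS = (5, 14, 23, 32)
--
-- def _proxy_feature_layer(moe_layer: int) -> int:
--     return sum(1 for t in MIDPOINTS if moe_layer > t)
-- ===== Notes on version B (the rewrite author's own statement) =====
-- stated objective: idiomatic
-- what changed: Replaces the running-min scan over absolute distances to FEATURE_LAYERS with direct bucketing: count how many inter-layer midpoints (5, 14, 23, 32) moe_layer strictly exceeds.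
import Mathlib
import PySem

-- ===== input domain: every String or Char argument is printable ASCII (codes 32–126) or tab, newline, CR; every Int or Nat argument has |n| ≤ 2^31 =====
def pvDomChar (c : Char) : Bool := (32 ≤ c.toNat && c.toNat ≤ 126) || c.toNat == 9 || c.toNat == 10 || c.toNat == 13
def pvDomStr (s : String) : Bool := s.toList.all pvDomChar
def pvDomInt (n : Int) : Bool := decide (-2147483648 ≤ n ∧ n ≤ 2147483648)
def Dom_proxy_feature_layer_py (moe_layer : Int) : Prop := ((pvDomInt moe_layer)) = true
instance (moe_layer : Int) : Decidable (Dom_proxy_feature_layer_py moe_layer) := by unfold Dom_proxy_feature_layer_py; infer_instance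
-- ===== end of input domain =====

-- B replaces A's running-min over distances to the feature layers by counting
-- midpoints strictly exceeded (idiomatic bucketing); return values proved equal.

-- ===== PORT A =====
def FEATURE_LAYERS : List Int := [1, 10, 19, 28, 37]

-- Python's abs on ints (exact)
def pyabs (x : Int) : Int := if x < 0 then -x else x

def proxy_feature_layer_py (moe_layer : Int) : Int :=
  ((PySem.List.enumerate FEATURE_LAYERS).foldl
    (fun (s : Int × Int) (p : Int × Int) =>
      if pyabs (moe_layer - p.2) < s.2 then (p.1, pyabs (moe_layer - p.2)) else s)
    ((0 : Int), pyabs (moe_layer - 1))).1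

-- ===== PORT B =====
def MIDPOINTS : List Int := [5, 14, 23, 32]

def proxy_feature_layer_py_alt (moe_layer : Int) : Int :=
  MIDPOINTS.foldl (fun acc t => if moe_layer > t then acc + 1 else acc) 0

-- ===== PRECONDITION & SPEC =====
def Spec_proxy_feature_layer_py (moe_layer : Int) (out : Int) : Prop := out = proxy_feature_layer_py_alt moe_layer
instance (moe_layer : Int) (out : Int) : Decidable (Spec_proxy_feature_layer_py moe_layer out) := by unfold Spec_proxy_feature_layer_py; infer_instance

-- ===== CLAIM (what is proved, stated in full; the proofs are below) =====
def Claim_equal_proxy_feature_layer_py : Prop := ∀ (moe_layer : Int), Dom_proxy_feature_layer_py moe_layer → Spec_proxy_feature_layer_py moe_layer (proxy_feature_layer_py moe_layer)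

-- ===== LEMMAS AND PROOFS =====

-- ===== VERDICT (by name: the statement is the Claim_ definition above) =====
theorem pyabs_eq_natAbs (x : Int) : pyabs x = (x.natAbs : Int) := by
  unfold pyabs; split_ifs <;> omega

set_option maxHeartbeats 2000000 in
theorem proxy_feature_layer_py_spec : Claim_equal_proxy_feature_layer_py := by
  intro m _
  unfold Spec_proxy_feature_layer_py proxy_feature_layer_py proxy_feature_layer_py_alt
  simp only [FEATURE_LAYERS, MIDPOINTS, PySem.List.enumerate_cons, PySem.List.enumerate_nil,
    List.foldl, pyabs_eq_natAbs]
  split_ifs <;> omega
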